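-- pv_equiv track=rewrite | github.com/dev-seohui/Algorithm-Challenge | 프로그래머스Lv1/26. 둘만의 암호.py | solution
-- ===== SOURCE A (Python) =====
-- def solution(s, skip, index):
--     alphabet = "abcdefghijklmnopqrstuvwxyz"
--     result = ""
--     for i in skip:
--         alphabet = alphabet.replace(i, "")
--
--     for i in range(len(s)+1):
--         result += alphabet[(i+index)%len(alphabet)]
--     return result
-- ===== SOURCE B (Python) =====
-- def solution(s, skip, index):
--     alphabet = "".join(c for c in "abcdefghijklmnopqrstuvwxyz" if c not in skip)
--     L = len(alphabet)
--     n = len(s) + 1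
--     off = index % L
--     rotated = alphabet[off:] + alphabet[:off]
--     return (rotated * (n // L + 1))[:n]
-- ===== Notes on version B (the rewrite author's own statement) =====
-- stated objective: faster
-- what changed: B filters the alphabet once and builds the answer in closed form as a rotation of the alphabet repeated and truncated to len(s)+1, instead of A's per-character loop computing (i+index)%L and indexing for each position.
import Mathlib
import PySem

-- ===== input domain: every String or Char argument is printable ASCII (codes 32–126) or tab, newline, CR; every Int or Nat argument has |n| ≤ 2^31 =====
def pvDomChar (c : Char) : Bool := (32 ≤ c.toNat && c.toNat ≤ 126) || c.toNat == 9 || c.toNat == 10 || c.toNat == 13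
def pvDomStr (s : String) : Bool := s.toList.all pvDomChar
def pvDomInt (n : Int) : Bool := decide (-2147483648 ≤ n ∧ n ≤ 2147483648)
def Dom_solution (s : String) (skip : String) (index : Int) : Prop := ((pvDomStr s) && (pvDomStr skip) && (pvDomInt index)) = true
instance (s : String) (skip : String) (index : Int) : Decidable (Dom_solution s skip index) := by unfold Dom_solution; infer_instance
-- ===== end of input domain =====

-- B builds the result in closed form (rotate the filtered alphabet by index % L, repeat, truncate to len(s)+1) instead of A's per-index indexing loop; equal on Pre_ (some letter survives skip).

-- ===== PORT A =====
def solution (s : String) (skip : String) (index : Int) : String :=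
  let alphabet := skip.toList.foldl (fun ab c => PySem.Chars.replace ab [c] []) "abcdefghijklmnopqrstuvwxyz".toList
  String.mk ((PySem.List.pyRange 0 (PySem.Str.len s + 1) 1).foldl
    (fun res i => res ++ [PySem.List.pyGetD alphabet (PySem.Int.mod (i + index) (PySem.List.len alphabet)) ' ']) [])

-- ===== PORT B =====
def solution_alt (s : String) (skip : String) (index : Int) : String :=
  let alphabet := "abcdefghijklmnopqrstuvwxyz".toList.filter (fun c => !(PySem.Chars.isIn [c] skip.toList))
  let L : Int := PySem.List.len alphabet
  let n : Int := PySem.Str.len s + 1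
  let off := PySem.Int.mod index L
  let rotated := PySem.List.slice alphabet (some off) none ++ PySem.List.slice alphabet none (some off)
  String.mk (PySem.List.slice (List.flatten (List.replicate (PySem.Int.floordiv n L + 1).toNat rotated)) none (some n))

-- ===== PRECONDITION & SPEC =====
-- Pre_ excludes exactly the inputs where skip contains all 26 lowercase letters: there both A and B raise ZeroDivisionError ('% 0' on the emptied alphabet).
def Pre_solution (s : String) (skip : String) (index : Int) : Prop :=
  ("abcdefghijklmnopqrstuvwxyz".toList.any (fun c => !(skip.toList.contains c))) = true
instance (s : String) (skip : String) (index : Int) : Decidable (Pre_solution s skip index) := by unfold Pre_solution; infer_instance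
def pvWitness_solution : String × String × Int := ("ab", "xz", 3)

def Spec_solution (s : String) (skip : String) (index : Int) (out : String) : Prop := out = solution_alt s skip index
instance (s : String) (skip : String) (index : Int) (out : String) : Decidable (Spec_solution s skip index out) := by unfold Spec_solution; infer_instance

-- ===== CLAIM (what is proved, stated in full; the proofs are below) =====
def Claim_equal_solution : Prop := ∀ (s : String) (skip : String) (index : Int), Dom_solution s skip index → Pre_solution s skip index → Spec_solution s skip index (solution s skip index)

-- ===== LEMMAS AND PROOFS =====

-- Python's str.replace of a single character by "" is exactly a filter.
theorem go_filter (c : Char) (cs acc : List Char) :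
    PySem.Chars.replace.go [c] [] cs.length cs acc = acc.reverse ++ cs.filter (· ≠ c) := by
  induction cs generalizing acc with
  | nil => simp [PySem.Chars.replace.go]
  | cons x t ih =>
    rw [List.length_cons, PySem.Chars.replace.go]
    by_cases h : x = c
    · subst h
      simp [List.isPrefixOf, List.filter, ih]
    · rw [if_neg (by simpa [List.isPrefixOf] using Ne.symm h)]
      simp [List.filter, ih, h]

theorem replace_single (c : Char) (cs : List Char) :
    PySem.Chars.replace cs [c] [] = cs.filter (· ≠ c) := by
  rw [PySem.Chars.replace]
  simp [go_filter]

-- A's loop of single-character replaces is one filter against the whole skip list.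
theorem fold_replace_eq_filter (sk : List Char) (ab : List Char) :
    sk.foldl (fun ab c => PySem.Chars.replace ab [c] []) ab
      = ab.filter (fun x => !sk.contains x) := by
  induction sk generalizing ab with
  | nil => simp
  | cons c t ih =>
    rw [List.foldl_cons, ih, replace_single, List.filter_filter]
    apply List.filter_congr
    intro x _
    by_cases hx : x = c <;> simp [hx]

-- single-character 'c in skip' is list membership
theorem isIn_singleton (c : Char) (l : List Char) : PySem.Chars.isIn [c] l = l.contains c := by
  rw [Bool.eq_iff_iff, PySem.Chars.isIn_iff_infix, List.singleton_infix_iff]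
  simp

theorem getElem?_flatten_replicate {α : Type} (m : Nat) (xs : List α) (k : Nat)
    (hk : k < m * xs.length) :
    (List.flatten (List.replicate m xs))[k]? = xs[k % xs.length]? := by
  induction m generalizing k with
  | zero => omega
  | succ m ih =>
    rw [Nat.succ_mul] at hk
    rw [List.replicate_succ, List.flatten_cons]
    by_cases h : k < xs.length
    · rw [List.getElem?_append_left h, Nat.mod_eq_of_lt h]
    · rw [List.getElem?_append_right (by omega)]
      rw [ih (k - xs.length) (by omega)]
      conv_rhs => rw [Nat.mod_eq_sub_mod (by omega)]

theorem getElem?_rot {α : Type} (xs : List α) (a j : Nat) (ha : a ≤ xs.length)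
    (hj : j < xs.length) :
    (xs.drop a ++ xs.take a)[j]? = xs[(j + a) % xs.length]? := by
  by_cases h : j < xs.length - a
  · rw [List.getElem?_append_left (by rw [List.length_drop]; omega)]
    rw [List.getElem?_drop, Nat.mod_eq_of_lt (by omega)]
    congr 1; omega
  · rw [List.getElem?_append_right (by rw [List.length_drop]; omega)]
    rw [List.length_drop]
    rw [List.getElem?_take_of_lt (by omega)]
    conv_rhs => rw [Nat.mod_eq_sub_mod (by omega)]
    rw [Nat.mod_eq_of_lt (by omega)]
    congr 1; omega

-- core: A's per-index map equals B's rotate-repeat-truncate, over any nonempty alphabet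
theorem main_list (al : List Char) (hL : 0 < al.length) (index : Int) (n : Nat) :
    (List.range n).map (fun (k : Nat) => PySem.List.pyGetD al (PySem.Int.mod ((k:Int)+index) (al.length:Int)) ' ')
    = List.take n (List.flatten (List.replicate (n / al.length + 1)
        (al.drop (PySem.Int.mod index (al.length:Int)).toNat ++ al.take (PySem.Int.mod index (al.length:Int)).toNat))) := by
  have hLZ : (0:Int) < (al.length:Int) := by exact_mod_cast hL
  set off := PySem.Int.mod index (al.length:Int) with hoffdef
  have hoff0 : 0 ≤ off := PySem.Int.mod_nonneg index hLZ
  have hoffL : off < (al.length:Int) := PySem.Int.mod_lt index hLZ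
  set a := off.toNat with hadef
  have haL : a < al.length := by omega
  have hacast : (a:Int) = off := by omega
  set m := n / al.length + 1 with hmdef
  have hrotlen : (al.drop a ++ al.take a).length = al.length := by
    simp; omega
  have hnm : n < m * al.length := by
    have h1 := Nat.div_add_mod n al.length
    have h2 := Nat.mod_lt n hL
    have h3 : m * al.length = al.length * (n / al.length) + al.length := by
      rw [hmdef, Nat.succ_mul, Nat.mul_comm]
    omega
  apply List.ext_getElem?
  intro k
  by_cases hk : k < n
  · rw [List.getElem?_take_of_lt hk]
    rw [List.getElem?_map, List.getElem?_range hk]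
    rw [getElem?_flatten_replicate m _ k (by rw [hrotlen]; omega)]
    rw [hrotlen, getElem?_rot al a (k % al.length) (by omega) (Nat.mod_lt k hL)]
    have hmod := PySem.Int.mod_eq_emod_of_pos (a := (k:Int)+index) hLZ
    have hmod2 := PySem.Int.mod_eq_emod_of_pos (a := index) hLZ
    have hin0 : 0 ≤ PySem.Int.mod ((k:Int)+index) (al.length:Int) := PySem.Int.mod_nonneg _ hLZ
    have hinL : PySem.Int.mod ((k:Int)+index) (al.length:Int) < (al.length:Int) := PySem.Int.mod_lt _ hLZ
    simp only [Option.map_some]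
    rw [PySem.List.pyGetD_eq_getElem al ' ' hin0 hinL]
    rw [List.getElem?_eq_getElem (Nat.mod_lt _ hL)]
    have hacast' : (a:Int) = index % (al.length:Int) := by rw [hacast, hoffdef, hmod2]
    have key : ((k:Int)+index) % (al.length:Int) = (((k % al.length + a) % al.length : Nat) : Int) := by
      push_cast
      rw [hacast']
      exact Int.add_emod _ _ _
    have e4 : (PySem.Int.mod ((k:Int)+index) (al.length:Int)).toNat = (k % al.length + a) % al.length := by
      rw [hmod, key, Int.toNat_natCast]
    simp [e4]
  · rw [List.getElem?_eq_none (by simp; omega), List.getElem?_eq_none (by simp; omega)]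

-- ===== VERDICT (by name: the statement is the Claim_ definition above) =====
theorem solution_spec : Claim_equal_solution := by
  intro s skip index _ hpre
  unfold Spec_solution solution solution_alt
  dsimp only
  -- both alphabets are the same filtered list
  set al := "abcdefghijklmnopqrstuvwxyz".toList.filter (fun x => !(skip.toList.contains x)) with hal
  have hA : skip.toList.foldl (fun ab c => PySem.Chars.replace ab [c] []) "abcdefghijklmnopqrstuvwxyz".toList = al :=
    fold_replace_eq_filter _ _
  have hB : "abcdefghijklmnopqrstuvwxyz".toList.filter (fun c => !(PySem.Chars.isIn [c] skip.toList)) = al := by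
    apply List.filter_congr
    intro x _
    rw [isIn_singleton]
  have hL : 0 < al.length := by
    unfold Pre_solution at hpre
    rw [List.any_eq_true] at hpre
    obtain ⟨c, hc, hpc⟩ := hpre
    exact List.length_pos_of_mem (List.mem_filter.mpr ⟨hc, hpc⟩)
  have hLZ : (0:Int) < (al.length:Int) := by exact_mod_cast hL
  rw [hA, hB]
  congr 1
  set n : Nat := s.toList.length + 1 with hn
  have hncast : PySem.Str.len s + 1 = ((n:Nat):Int) := by
    simp [PySem.Str.len_eq, hn]
  rw [hncast]
  -- A side: loop → map over range
  rw [PySem.List.pyRange_zero_natCast n]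
  rw [PySem.List.foldl_append_singleton_eq_map]
  rw [List.map_map, List.nil_append]
  -- B side: slices and floordiv in Nat form
  have hoff0 : 0 ≤ PySem.Int.mod index (PySem.List.len al) := by
    simpa [PySem.List.len_eq] using PySem.Int.mod_nonneg index hLZ
  rw [PySem.List.slice_from al hoff0, PySem.List.slice_to al hoff0]
  rw [PySem.List.slice_to _ (show (0:Int) ≤ ((n:Nat):Int) by positivity)]
  have hfd : (PySem.Int.floordiv ((n:Nat):Int) (PySem.List.len al) + 1).toNat = n / al.length + 1 := by
    simp [PySem.List.len_eq, PySem.Int.floordiv_natCast]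
    rw [← Int.natCast_div, ← Nat.cast_one (R := Int), ← Nat.cast_add, Int.toNat_natCast]
  rw [hfd]
  have htn : (((n:Nat):Int)).toNat = n := by omega
  rw [htn]
  simpa [PySem.List.len_eq, Function.comp] using main_list al hL index n
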